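-- pv_equiv track=rewrite | github.com/student079/Algorithm | 프로그래머스/3/64062. 징검다리 건너기/징검다리 건너기.py | solution
-- ===== SOURCE A (Python) =====
-- def solution(stones, k):
--
--     # O(n)으로 해결
--     # 0인게 k만큼이면 끝
--     # 이분 탐색 같은데
--     # left = 최솟값, right = 최댓값
--
--     left = 1
--     right = 200000000
--
--     while left <= right:
--         mid = (left+right)//2
--
--         cnt = 0
--         for i in stones:
--             if i - mid <= 0:
--                 cnt += 1
--             else:
--                 cnt = 0
--             if cnt >= k:
--                 break
--         if cnt < k:
--             left = mid + 1
--         else: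
--             right = mid - 1
--
--
--     return left
-- ===== SOURCE B (Python) =====
-- def solution(stones, k):
--     # One-pass sliding-window maximum (monotonic queue over (index, value) pairs).
--     # The answer is the minimum over all length-k windows of the window maximum,
--     # kept within A's fixed search range [1, 200000001] (200000001 = "no window").
--     best = 200000001
--     dq = []      # (index, value) pairs, values strictly decreasing
--     head = 0     # logical front of dq
--     for i, x in enumerate(stones):
--         while head < len(dq) and dq[-1][1] <= x:
--             dq.pop()
--         dq.append((i, x))
--         if dq[head][0] <= i - k:
--             head += 1
--         if i >= k - 1:
--             wmax = dq[head][1]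
--             if wmax < best:
--                 best = wmax
--     return max(1, best)
-- ===== Notes on version B (the rewrite author's own statement) =====
-- stated objective: faster
-- what changed: Replaces the binary search over the fixed range [1,200000000] (each probe rescanning all stones) by a single sliding-window-maximum pass with a monotonic queue, taking the minimum window maximum clamped to A's search range.
-- outside the precondition, e.g. on solution([3, 1, 2], 0): A returns 1, B raises IndexError; on solution([], 0): A returns 1, B returns 200000001
import Mathlib
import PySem

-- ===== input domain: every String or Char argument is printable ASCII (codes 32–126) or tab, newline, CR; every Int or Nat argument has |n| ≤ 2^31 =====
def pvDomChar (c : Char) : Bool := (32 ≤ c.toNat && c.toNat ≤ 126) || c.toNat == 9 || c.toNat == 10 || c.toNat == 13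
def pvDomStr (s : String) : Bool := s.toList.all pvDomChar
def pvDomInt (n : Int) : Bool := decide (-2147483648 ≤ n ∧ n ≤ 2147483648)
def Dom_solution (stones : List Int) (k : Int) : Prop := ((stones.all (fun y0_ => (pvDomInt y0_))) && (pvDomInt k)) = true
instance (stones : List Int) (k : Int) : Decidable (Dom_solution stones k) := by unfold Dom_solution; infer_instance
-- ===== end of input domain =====

-- B replaces A's binary search over the fixed range [1,200000000] (each probe rescanning
-- the stones) by one sliding-window-maximum pass with a monotonic queue (faster, one pass).

-- ===== PORT A =====
-- the inner `for i in stones: ... if cnt >= k: break` loop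
def aCount (mid k : Int) : List Int → Int → Int
  | [], cnt => cnt
  | i :: rest, cnt =>
    let cnt' := if i - mid ≤ 0 then cnt + 1 else 0
    if k ≤ cnt' then cnt' else aCount mid k rest cnt'

-- the `while left <= right` binary-search loop
def aLoop (stones : List Int) (k left right : Int) : Int :=
  if h : left ≤ right then
    let mid := PySem.Int.floordiv (left + right) 2
    let cnt := aCount mid k stones 0
    if cnt < k then aLoop stones k (mid + 1) right else aLoop stones k left (mid - 1)
  else left
termination_by (right + 1 - left).toNat
decreasing_by
  · have := (PySem.Int.floordiv_two_mid_bounds h); omega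
  · have := (PySem.Int.floordiv_two_mid_bounds h); omega

def solution (stones : List Int) (k : Int) : Int := aLoop stones k 1 200000000

-- ===== PORT B =====
-- the `while head < len(dq) and dq[-1][1] <= x: dq.pop()` loop
def popTail (x : Int) (head : Nat) (dq : List (Int × Int)) : List (Int × Int) :=
  if h : head < dq.length ∧ ((dq.getLast?.map fun p => decide (p.2 ≤ x)).getD false) = true then
    popTail x head dq.dropLast
  else dq
termination_by dq.length
decreasing_by simp only [List.length_dropLast]; omega

-- one iteration of `for i, x in enumerate(stones)`; state = (best, dq, head).
-- dq[head] is always in range in the Python; the `.getD 0` defaults are never used.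
def bStep (k : Int) (s : Int × List (Int × Int) × Nat) (p : Int × Int) : Int × List (Int × Int) × Nat :=
  let best := s.1
  let head0 := s.2.2
  let dq := popTail p.2 head0 s.2.1 ++ [(p.1, p.2)]
  let head := if ((dq[head0]?.map fun q => decide (q.1 ≤ p.1 - k)).getD false) = true then head0 + 1 else head0
  let best' :=
    if k - 1 ≤ p.1 then
      let wmax := (dq[head]?.map fun q => q.2).getD 0
      if wmax < best then wmax else best
    else best
  (best', dq, head)

def solution_alt (stones : List Int) (k : Int) : Int :=
  let s := (PySem.List.enumerate stones).foldl (bStep k) (200000001, ([], 0))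
  max 1 s.1

-- ===== PRECONDITION & SPEC =====
-- Pre_ requires a positive window size k ≥ 1: for k < 1 A's bounded binary search returns
-- an artifact of its fixed range (1) while B's window algorithm has no length-k window and
-- raises IndexError (or, on empty stones, reports "no window").
def Pre_solution (stones : List Int) (k : Int) : Prop := 1 ≤ k
instance (stones : List Int) (k : Int) : Decidable (Pre_solution stones k) := by unfold Pre_solution; infer_instance
def pvWitness_solution : List Int × Int := ([2, 4, 5, 3, 2, 1, 4, 2, 5, 1], 3)

def Spec_solution (stones : List Int) (k : Int) (out : Int) : Prop := out = solution_alt stones k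
instance (stones : List Int) (k : Int) (out : Int) : Decidable (Spec_solution stones k out) := by unfold Spec_solution; infer_instance

-- ===== CLAIM (what is proved, stated in full; the proofs are below) =====
def Claim_equal_solution : Prop := ∀ (stones : List Int) (k : Int), Dom_solution stones k → Pre_solution stones k → Spec_solution stones k (solution stones k)

-- ===== LEMMAS AND PROOFS =====

-- `stones[l]` for a Nat index, with an unused default
def getI (xs : List Int) (l : Nat) : Int := (xs[l]?).getD 0

-- "some k consecutive stones are all ≤ m", index form
def Qp (stones : List Int) (k m : Int) : Prop :=
  ∃ i : Nat, (i : Int) + k ≤ stones.length ∧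
    ∀ l : Nat, i ≤ l → (l : Int) < (i : Int) + k → getI stones l ≤ m

-- "some k consecutive stones are all ≤ m", segment form
def QSeg (stones : List Int) (k m : Int) : Prop :=
  ∃ u w v : List Int, stones = u ++ w ++ v ∧ (w.length : Int) = k ∧ ∀ y ∈ w, y ≤ m

-- the `while` loop of B, restricted to the active part dq[head:]
def popEnd (x : Int) (act : List (Int × Int)) : List (Int × Int) :=
  if h : ((act.getLast?.map fun p => decide (p.2 ≤ x)).getD false) = true then
    popEnd x act.dropLast
  else act
termination_by act.length
decreasing_by
  cases act with
  | nil => simp at h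
  | cons a l => simp only [List.length_dropLast]; simp

-- invariant on the active deque after processing the first t stones
def InvAct (stones : List Int) (k : Int) (t : Nat) (act : List (Int × Int)) : Prop :=
  (∀ p ∈ act, 0 ≤ p.1 ∧ (t : Int) - k ≤ p.1 ∧ p.1 < t ∧ stones[p.1.toNat]? = some p.2) ∧
  act.Pairwise (fun p q => p.1 < q.1 ∧ q.2 < p.2) ∧
  (∀ l : Nat, (t : Int) - k ≤ l → l < t → ∃ p ∈ act, (l : Int) ≤ p.1 ∧ getI stones l ≤ p.2)

-- invariant on best after processing the first t stones
def InvBest (stones : List Int) (k : Int) (t : Nat) (best : Int) : Prop :=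
  (∀ i : Nat, (i : Int) + k ≤ t → ∃ l : Nat, i ≤ l ∧ (l : Int) < (i : Int) + k ∧ best ≤ getI stones l) ∧
  (best = 200000001 ∨ ∃ i : Nat, (i : Int) + k ≤ t ∧
      ∀ l : Nat, i ≤ l → (l : Int) < (i : Int) + k → getI stones l ≤ best) ∧
  best ≤ 200000001

lemma Qp_mono {stones : List Int} {k m m' : Int} (h : Qp stones k m) (hmm : m ≤ m') : Qp stones k m' := by
  obtain ⟨i, h1, h2⟩ := h
  exact ⟨i, h1, fun l hl1 hl2 => le_trans (h2 l hl1 hl2) hmm⟩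

lemma split_take_drop {α : Type} (u v : List α) (n : Nat) :
    u ++ v = u.take n ++ (u.drop n ++ v) := by
  rw [← List.append_assoc, List.take_append_drop]

lemma QSeg_iff_Qp (stones : List Int) (k m : Int) (hk : 1 ≤ k) :
    QSeg stones k m ↔ Qp stones k m := by
  constructor
  · rintro ⟨u, w, v, rfl, hlen, hall⟩
    refine ⟨u.length, ?_, ?_⟩
    · simp; omega
    · intro l hl1 hl2
      have hlw : l - u.length < w.length := by omega
      have : ((u ++ w ++ v))[l]? = some w[l - u.length] := by
        rw [List.append_assoc, List.getElem?_append_right (by omega),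
          List.getElem?_append_left (by omega), List.getElem?_eq_getElem hlw]
      simp only [getI, this, Option.getD_some]
      exact hall _ (List.getElem_mem hlw)
  · rintro ⟨i, hik, hall⟩
    have hK : ((k.toNat : Int)) = k := Int.toNat_of_nonneg (by omega)
    have hKn : i + k.toNat ≤ stones.length := by omega
    refine ⟨stones.take i, (stones.drop i).take k.toNat, stones.drop (i + k.toNat), ?_, ?_, ?_⟩
    · rw [List.append_assoc, ← List.drop_drop, List.take_append_drop, List.take_append_drop]
    · simp; omega
    · intro y hy
      obtain ⟨j, hj, rfl⟩ := List.getElem_of_mem hy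
      have hjK : j < k.toNat := by simp at hj; omega
      have hij : i + j < stones.length := by omega
      have : ((stones.drop i).take k.toNat)[j] = stones[i + j] := by
        rw [List.getElem_take, List.getElem_drop]
      rw [this]
      have := hall (i + j) (by omega) (by push_cast; omega)
      simpa [getI, List.getElem?_eq_getElem hij] using this

lemma aCount_ge_iff (m k : Int) : ∀ (xs : List Int) (c : Int), 0 ≤ c → c < k →
    (k ≤ aCount m k xs c ↔
      (∃ u v : List Int, xs = u ++ v ∧ (∀ y ∈ u, y ≤ m) ∧ k ≤ c + u.length) ∨ QSeg xs k m) := by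
  intro xs
  induction xs with
  | nil =>
    intro c h0 hck
    simp only [aCount]
    constructor
    · omega
    · rintro (⟨u, v, huv, _, hlen⟩ | ⟨u, w, v, huv, hlen, _⟩)
      · have hl := congrArg List.length huv; simp at hl; omega
      · have hl := congrArg List.length huv; simp at hl; omega
  | cons x xs ih =>
    intro c h0 hck
    simp only [aCount]
    by_cases hge : k ≤ (if x - m ≤ 0 then c + 1 else 0)
    · rw [if_pos hge]
      have hx : x - m ≤ 0 := by by_contra hc; rw [if_neg hc] at hge; omega
      rw [if_pos hx] at hge
      constructor
      · intro _
        exact Or.inl ⟨[x], xs, by simp, by intro y hy; simp at hy; omega, by simp; omega⟩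
      · intro _; rw [if_pos hx]; omega
    · rw [if_neg hge]
      set c' := if x - m ≤ 0 then c + 1 else 0 with hc'
      have h0' : 0 ≤ c' := by rw [hc']; split <;> omega
      have hck' : c' < k := by omega
      rw [ih c' h0' hck']
      constructor
      · rintro (⟨u, v, rfl, hall, hlen⟩ | ⟨u, w, v, rfl, hlen, hall⟩)
        · by_cases hx : x - m ≤ 0
          · rw [hc', if_pos hx] at hlen
            exact Or.inl ⟨x :: u, v, by simp, by
              intro y hy; rcases List.mem_cons.1 hy with rfl | hy'
              · omega
              · exact hall y hy', by simp; push_cast; omega⟩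
          · rw [hc', if_neg hx] at hlen
            have hku : k ≤ (u.length : Int) := by omega
            refine Or.inr ⟨[x], u.take k.toNat, u.drop k.toNat ++ v,
              by rw [List.cons_append, List.cons_append, List.nil_append, ← split_take_drop], ?_, ?_⟩
            · simp; omega
            · intro y hy; exact hall y (List.mem_of_mem_take hy)
        · exact Or.inr ⟨x :: u, w, v, by simp, hlen, hall⟩
      · rintro (⟨u, v, huv, hall, hlen⟩ | ⟨u, w, v, huv, hlen, hall⟩)
        · cases u with
          | nil => simp at hlen; omega
          | cons a u' =>
            simp only [List.cons_append, List.cons.injEq] at huv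
            obtain ⟨rfl, rfl⟩ := huv
            have hx : x - m ≤ 0 := by have := hall x (by simp); omega
            rw [hc', if_pos hx]
            exact Or.inl ⟨u', v, rfl, fun y hy => hall y (by simp [hy]),
              by simp at hlen ⊢; push_cast at hlen ⊢; omega⟩
        · cases u with
          | nil =>
            simp only [List.nil_append] at huv
            cases w with
            | nil => simp at hlen; omega
            | cons a w' =>
              simp only [List.cons_append, List.cons.injEq] at huv
              obtain ⟨rfl, rfl⟩ := huv
              have hx : x - m ≤ 0 := by have := hall x (by simp); omega
              rw [hc', if_pos hx]
              exact Or.inl ⟨w', v, rfl, fun y hy => hall y (by simp [hy]),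
                by simp at hlen ⊢; push_cast at hlen ⊢; omega⟩
          | cons a u' =>
            simp only [List.cons_append, List.cons.injEq] at huv
            obtain ⟨rfl, rfl⟩ := huv
            exact Or.inr ⟨u', w, v, rfl, hlen, hall⟩

lemma aCount_ge_iff_QSeg (m k : Int) (hk : 1 ≤ k) (xs : List Int) :
    k ≤ aCount m k xs 0 ↔ QSeg xs k m := by
  rw [aCount_ge_iff m k xs 0 (by omega) (by omega)]
  constructor
  · rintro (⟨u, v, rfl, hall, hlen⟩ | h)
    · refine ⟨[], u.take k.toNat, u.drop k.toNat ++ v, by rw [List.nil_append, ← split_take_drop], by simp; omega, ?_⟩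
      intro y hy; exact hall y (List.mem_of_mem_take hy)
    · exact h
  · exact Or.inr

lemma QA_iff (stones : List Int) (k m : Int) (hk : 1 ≤ k) :
    k ≤ aCount m k stones 0 ↔ Qp stones k m := by
  rw [aCount_ge_iff_QSeg m k hk, QSeg_iff_Qp stones k m hk]

lemma aLoop_spec (stones : List Int) (k : Int) (hk : 1 ≤ k) :
    ∀ (lo hi : Int), lo ≤ hi + 1 →
      lo ≤ aLoop stones k lo hi ∧ aLoop stones k lo hi ≤ hi + 1 ∧
      (∀ m, lo ≤ m → m < aLoop stones k lo hi → ¬ Qp stones k m) ∧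
      (aLoop stones k lo hi ≤ hi → Qp stones k (aLoop stones k lo hi)) := by
  intro lo hi
  fun_induction aLoop stones k lo hi with
  | case1 lo hi h mid cnt hlt ih =>
    intro _
    have hmid := PySem.Int.floordiv_two_mid_bounds h
    obtain ⟨i1, i2, i3, i4⟩ := ih (by omega)
    have hnq : ¬ Qp stones k mid := by
      rw [← QA_iff stones k mid hk]; omega
    refine ⟨by omega, by omega, ?_, i4⟩
    intro m hm1 hm2
    by_cases hmm : m ≤ mid
    · exact fun hq => hnq (Qp_mono hq hmm)
    · exact i3 m (by omega) hm2
  | case2 lo hi h mid cnt hlt ih =>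
    intro _
    have hmid := PySem.Int.floordiv_two_mid_bounds h
    obtain ⟨i1, i2, i3, i4⟩ := ih (by omega)
    have hq : Qp stones k mid := by
      rw [← QA_iff stones k mid hk]; omega
    refine ⟨i1, by omega, i3, ?_⟩
    intro hle
    rcases Int.lt_or_le (aLoop stones k lo (mid - 1)) mid with hl | hl
    · exact i4 (by omega)
    · have : aLoop stones k lo (mid - 1) = mid := by omega
      rw [this]; exact hq
  | case3 lo hi h =>
    intro hle
    exact ⟨le_refl _, by omega, fun m h1 h2 => by omega, fun hc => by omega⟩

lemma popEnd_step (x : Int) (act : List (Int × Int)) :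
    popEnd x act = if ((act.getLast?.map fun p => decide (p.2 ≤ x)).getD false) = true then
      popEnd x act.dropLast else act := by
  rw [popEnd]; split <;> simp_all

lemma getLast?_drop {α : Type} (l : List α) (n : Nat) (h : n < l.length) :
    (l.drop n).getLast? = l.getLast? := by
  rw [List.getLast?_eq_getElem?, List.getLast?_eq_getElem?, List.getElem?_drop,
    List.length_drop]
  congr 1; omega

lemma popTail_drop (x : Int) : ∀ (dq : List (Int × Int)) (head : Nat), head ≤ dq.length →
    popTail x head dq = dq.take head ++ popEnd x (dq.drop head) := by
  intro dq head
  fun_induction popTail x head dq with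
  | case1 dq h ih =>
    intro _
    have hlt : head < dq.length := h.1
    have h2 := h.2
    rw [popEnd_step x (dq.drop head), if_pos (by rw [getLast?_drop dq head hlt]; exact h2)]
    have e1 : dq.take head = dq.dropLast.take head := by
      rw [List.dropLast_eq_take, List.take_take]; congr 1; omega
    have e2 : (dq.drop head).dropLast = dq.dropLast.drop head := by
      rw [List.dropLast_eq_take, List.dropLast_eq_take, List.drop_take,
        List.length_drop]
      congr 1; omega
    rw [e1, e2, ih (by simp [List.length_dropLast]; omega)]
  | case2 dq h =>
    intro hle
    rcases Nat.lt_or_ge head dq.length with hlt | hge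
    · -- condition failed because last > x
      have h2 : ¬ ((dq.getLast?.map fun p => decide (p.2 ≤ x)).getD false = true) := by
        intro hc; exact h ⟨hlt, hc⟩
      rw [popEnd_step x (dq.drop head), if_neg (by rw [getLast?_drop dq head hlt]; exact h2)]
      exact (List.take_append_drop head dq).symm
    · have : head = dq.length := by omega
      subst this
      simp [List.drop_length, popEnd]

lemma popEnd_spec (x : Int) (act : List (Int × Int)) :
    ∃ s, act = popEnd x act ++ s ∧ ∀ p ∈ s, p.2 ≤ x := by
  fun_induction popEnd x act with
  | case1 act h ih =>
    obtain ⟨s, hs, hall⟩ := ih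
    cases hlast : act.getLast? with
    | none => simp [hlast] at h
    | some q =>
      have hne : act ≠ [] := by rintro rfl; simp at hlast
      refine ⟨s ++ [q], ?_, ?_⟩
      · rw [← List.append_assoc, ← hs, List.dropLast_append_getLast? _ hlast]
      · intro p hp
        rcases List.mem_append.1 hp with h1 | h1
        · exact hall p h1
        · simp at h1; subst h1
          simp [hlast] at h; exact h
  | case2 act h => exact ⟨[], by simp, by simp⟩

lemma popEnd_last (x : Int) (act : List (Int × Int)) (p : Int × Int)
    (h : (popEnd x act).getLast? = some p) : x < p.2 := by
  fun_induction popEnd x act with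
  | case1 act hc ih => exact ih h
  | case2 act hc =>
    rw [h] at hc; simp at hc; omega

lemma pairwise_last_le (L : List (Int × Int))
    (hP : L.Pairwise (fun p q => p.1 < q.1 ∧ q.2 < p.2)) (q : Int × Int)
    (hq : L.getLast? = some q) : ∀ p ∈ L, q.2 ≤ p.2 := by
  induction L with
  | nil => simp at hq
  | cons a L ih =>
    intro p hp
    rcases List.mem_cons.1 hp with rfl | hp'
    · cases hL : L with
      | nil => subst hL; simp at hq; subst hq; rfl
      | cons b L' =>
        rw [hL, List.getLast?_cons_cons] at hq
        have hqL : q ∈ L := by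
          rw [hL]; exact List.mem_of_getLast? hq
        have := (List.pairwise_cons.1 hP).1 q hqL
        omega
    · cases hL : L with
      | nil => subst hL; simp at hp'
      | cons b L' =>
        subst hL
        rw [List.getLast?_cons_cons] at hq
        exact ih (List.pairwise_cons.1 hP).2 hq p hp'

lemma step_act (stones : List Int) (k : Int) (hk : 1 ≤ k) (t : Nat) (x : Int)
    (hx : stones[t]? = some x) (act : List (Int × Int)) (hI : InvAct stones k t act)
    (hd : Int × Int) (rest : List (Int × Int))
    (h1 : popEnd x act ++ [((t : Int), x)] = hd :: rest) :
    InvAct stones k (t + 1) (if hd.1 ≤ (t : Int) - k then rest else hd :: rest) ∧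
    ((t : Int), x) ∈ (if hd.1 ≤ (t : Int) - k then rest else hd :: rest) := by
  obtain ⟨hE, hC, hD⟩ := hI
  obtain ⟨s, hsplit, hs⟩ := popEnd_spec x act
  have hPsub : (popEnd x act).Sublist act := by
    conv_rhs => rw [hsplit]
    exact List.sublist_append_left _ s
  have hPmem : ∀ p ∈ popEnd x act, p ∈ act := fun p hp => hPsub.mem hp
  have hPpw := hC.sublist hPsub
  have hPgt : ∀ p ∈ popEnd x act, x < p.2 := by
    intro p hp
    cases hlast : (popEnd x act).getLast? with
    | none => rw [List.getLast?_eq_none_iff] at hlast; rw [hlast] at hp; simp at hp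
    | some q =>
      have := popEnd_last x act q hlast
      have := pairwise_last_le _ hPpw q hlast p hp
      omega
  have hCa1 : (hd :: rest).Pairwise (fun p q => p.1 < q.1 ∧ q.2 < p.2) := by
    rw [← h1]
    refine List.pairwise_append.2 ⟨hPpw, List.pairwise_singleton _ _, ?_⟩
    intro p hp q hq
    simp only [List.mem_singleton] at hq; subst hq
    exact ⟨(hE p (hPmem p hp)).2.2.1, hPgt p hp⟩
  have hEa1 : ∀ p ∈ hd :: rest, 0 ≤ p.1 ∧ (t : Int) - k ≤ p.1 ∧ p.1 < (t : Int) + 1 ∧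
      stones[p.1.toNat]? = some p.2 := by
    intro p hp
    rw [← h1] at hp
    rcases List.mem_append.1 hp with hp' | hp'
    · obtain ⟨e1, e2, e3, e4⟩ := hE p (hPmem p hp')
      exact ⟨e1, e2, by omega, e4⟩
    · simp only [List.mem_singleton] at hp'; subst hp'
      exact ⟨by positivity, by simp; omega, by simp, by simpa using hx⟩
  have hrest_gt : ∀ q ∈ rest, hd.1 < q.1 ∧ q.2 < hd.2 := (List.pairwise_cons.1 hCa1).1
  have htx_mem : ((t : Int), x) ∈ hd :: rest := by
    rw [← h1]; exact List.mem_append_right _ (List.mem_singleton_self _)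
  have hgetIt : getI stones t = x := by simp [getI, hx]
  by_cases hev : hd.1 ≤ (t : Int) - k
  · rw [if_pos hev]
    have hhd_ne : hd ≠ ((t : Int), x) := by
      intro h; rw [h] at hev; simp at hev; omega
    have htx2 : ((t : Int), x) ∈ rest := by
      rcases List.mem_cons.1 htx_mem with h | h
      · exact absurd h.symm hhd_ne
      · exact h
    refine ⟨⟨?_, (List.pairwise_cons.1 hCa1).2, ?_⟩, htx2⟩
    · intro p hp
      obtain ⟨e1, e2, e3, e4⟩ := hEa1 p (List.mem_cons_of_mem _ hp)
      have := (hrest_gt p hp).1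
      have := (hEa1 hd (List.mem_cons_self)).2.1
      refine ⟨e1, by push_cast; omega, by push_cast; omega, e4⟩
    · intro l hl1 hl2
      push_cast at hl1 hl2
      by_cases hlt : l = t
      · subst hlt
        exact ⟨_, htx2, by omega, by simpa using hgetIt.le⟩
      · obtain ⟨p, hpact, hlp, hgle⟩ := hD l (by omega) (by omega)
        rw [hsplit] at hpact
        rcases List.mem_append.1 hpact with hp' | hp'
        · have hp1 : p ∈ hd :: rest := by
            rw [← h1]; exact List.mem_append_left _ hp'
          rcases List.mem_cons.1 hp1 with rfl | hp2
          · omega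
          · exact ⟨p, hp2, hlp, hgle⟩
        · exact ⟨_, htx2, by omega, by simpa using le_trans hgle (hs p hp')⟩
  · rw [if_neg hev]
    refine ⟨⟨?_, hCa1, ?_⟩, htx_mem⟩
    · intro p hp
      obtain ⟨e1, e2, e3, e4⟩ := hEa1 p hp
      rcases List.mem_cons.1 hp with rfl | hp2
      · exact ⟨e1, by push_cast; omega, by push_cast; omega, e4⟩
      · have := (hrest_gt p hp2).1
        have := (hEa1 hd (List.mem_cons_self)).2.1
        refine ⟨e1, by push_cast; omega, by push_cast; omega, e4⟩
    · intro l hl1 hl2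
      push_cast at hl1 hl2
      by_cases hlt : l = t
      · subst hlt
        exact ⟨_, htx_mem, by omega, by simpa using hgetIt.le⟩
      · obtain ⟨p, hpact, hlp, hgle⟩ := hD l (by omega) (by omega)
        rw [hsplit] at hpact
        rcases List.mem_append.1 hpact with hp' | hp'
        · exact ⟨p, by rw [← h1]; exact List.mem_append_left _ hp', hlp, hgle⟩
        · exact ⟨_, htx_mem, by omega, by simpa using le_trans hgle (hs p hp')⟩

lemma step_best (stones : List Int) (k : Int) (hk : 1 ≤ k) (t : Nat) (best : Int)
    (p0 : Int × Int) (rest2 : List (Int × Int))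
    (hI2 : InvAct stones k (t + 1) (p0 :: rest2))
    (hB : InvBest stones k t best) :
    InvBest stones k (t + 1)
      (if k - 1 ≤ (t : Int) then (if p0.2 < best then p0.2 else best) else best) := by
  obtain ⟨hE2, hC2, hD2⟩ := hI2
  obtain ⟨hA, hW, hcap⟩ := hB
  by_cases hbr : k - 1 ≤ (t : Int)
  · rw [if_pos hbr]
    obtain ⟨e1, e2, e3, e4⟩ := hE2 p0 (List.mem_cons_self)
    have hp0n : ((p0.1.toNat : Int)) = p0.1 := Int.toNat_of_nonneg e1
    have hp0get : getI stones p0.1.toNat = p0.2 := by simp [getI, e4]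
    have hmax : ∀ l : Nat, (t : Int) + 1 - k ≤ l → l < t + 1 → getI stones l ≤ p0.2 := by
      intro l hl1 hl2
      obtain ⟨p, hp, _, hgle⟩ := hD2 l (by push_cast; omega) hl2
      rcases List.mem_cons.1 hp with rfl | hp2
      · exact hgle
      · have := (List.pairwise_cons.1 hC2).1 p hp2; omega
    refine ⟨?_, ?_, by split_ifs <;> omega⟩
    · intro i hik
      push_cast at hik ⊢
      by_cases hik' : (i : Int) + k ≤ t
      · obtain ⟨l, l1, l2, l3⟩ := hA i hik'
        exact ⟨l, l1, l2, by split_ifs <;> omega⟩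
      · refine ⟨p0.1.toNat, by push_cast at e2; omega, by push_cast at e3; omega, ?_⟩
        rw [hp0get]; split_ifs <;> omega
    · by_cases hup : p0.2 < best
      · rw [if_pos hup]
        right
        refine ⟨t + 1 - k.toNat, ?_, ?_⟩
        · push_cast; omega
        · intro l hl1 hl2
          push_cast at hl1 hl2
          exact hmax l (by omega) (by omega)
      · rw [if_neg hup]
        rcases hW with h | ⟨i, hik, hall⟩
        · exact Or.inl h
        · exact Or.inr ⟨i, by push_cast at hik ⊢; omega, hall⟩
  · rw [if_neg hbr]
    refine ⟨?_, ?_, hcap⟩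
    · intro i hik
      push_cast at hik; omega
    · rcases hW with h | ⟨i, hik, hall⟩
      · exact Or.inl h
      · exact Or.inr ⟨i, by push_cast at hik ⊢; omega, hall⟩

lemma fold_inv (stones : List Int) (k : Int) (hk : 1 ≤ k) :
    ∀ (xs : List Int) (t : Nat) (best : Int) (dq : List (Int × Int)) (head : Nat),
      stones.drop t = xs → t ≤ stones.length → head ≤ dq.length →
      InvAct stones k t (dq.drop head) → InvBest stones k t best →
      InvBest stones k stones.length
        ((PySem.List.enumerate xs t).foldl (bStep k) (best, dq, head)).1 := by
  intro xs
  induction xs with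
  | nil =>
    intro t best dq head hdrop htlen hhead hIA hB
    have : t = stones.length := by
      have := congrArg List.length hdrop; simp at this; omega
    subst this
    simpa [PySem.List.enumerate_nil] using hB
  | cons x xs' ih =>
    intro t best dq head hdrop htlen hhead hIA hB
    have ht : t < stones.length := by
      have := congrArg List.length hdrop; simp at this; omega
    have hx : stones[t]? = some x := by
      have h0 : (stones.drop t)[0]? = some x := by rw [hdrop]; rfl
      rw [List.getElem?_drop] at h0; simpa using h0
    have hxs' : stones.drop (t + 1) = xs' := by
      rw [← List.drop_drop, hdrop]; rfl
    rw [PySem.List.enumerate_cons, List.foldl_cons]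
    set act := dq.drop head with hact
    have hpt : popTail x head dq = dq.take head ++ popEnd x act := popTail_drop x dq head hhead
    set dq' := popTail x head dq ++ [((t : Int), x)] with hdq'
    have hlen' : dq'.length = head + (popEnd x act).length + 1 := by
      rw [hdq', hpt]; simp [List.length_take, Nat.min_eq_left hhead]; omega
    have hact1 : dq'.drop head = popEnd x act ++ [((t : Int), x)] := by
      rw [hdq', hpt, List.append_assoc]
      exact List.drop_left' (by simp [List.length_take, Nat.min_eq_left hhead])
    obtain ⟨hd, rest, h1⟩ : ∃ hd rest, popEnd x act ++ [((t : Int), x)] = hd :: rest := by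
      cases h : popEnd x act ++ [((t : Int), x)] with
      | nil => exact absurd h (by simp)
      | cons a l => exact ⟨a, l, rfl⟩
    have hgethd : dq'[head]? = some hd := by
      have h0 : (dq'.drop head)[0]? = dq'[head + 0]? := List.getElem?_drop
      rw [hact1, h1] at h0
      simpa using h0.symm
    obtain ⟨hIA2, htxmem⟩ := step_act stones k hk t x hx act hIA hd rest h1
    have hcast : ((t : Int) + 1) = (((t + 1 : Nat)) : Int) := by push_cast; ring
    by_cases hev : hd.1 ≤ (t : Int) - k
    · rw [if_pos hev] at hIA2 htxmem
      have hact2 : dq'.drop (head + 1) = rest := by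
        rw [← List.drop_drop, hact1, h1]; rfl
      cases hrest : rest with
      | nil => rw [hrest] at htxmem; simp at htxmem
      | cons p0 rest2 =>
        have hgetp0 : dq'[head + 1]? = some p0 := by
          have h0 : (dq'.drop (head + 1))[0]? = dq'[head + 1 + 0]? := List.getElem?_drop
          rw [hact2, hrest] at h0
          simpa using h0.symm
        have hbs : bStep k (best, dq, head) ((t : Int), x) =
            (if k - 1 ≤ (t : Int) then (if p0.2 < best then p0.2 else best) else best,
              dq', head + 1) := by
          simp only [bStep, ← hdq', hgethd, Option.map_some, Option.getD_some,
            decide_eq_true_eq, if_pos hev, hgetp0]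
        rw [hbs, hcast]
        exact ih (t + 1) _ dq' (head + 1) hxs' (by omega) (by omega)
          (by rw [hact2, hrest]; exact hrest ▸ hIA2)
          (step_best stones k hk t best p0 rest2 (hrest ▸ hIA2) hB)
    · rw [if_neg hev] at hIA2 htxmem
      have hact2 : dq'.drop head = hd :: rest := by rw [hact1, h1]
      have hbs : bStep k (best, dq, head) ((t : Int), x) =
          (if k - 1 ≤ (t : Int) then (if hd.2 < best then hd.2 else best) else best,
            dq', head) := by
        simp only [bStep, ← hdq', hgethd, Option.map_some, Option.getD_some,
          decide_eq_true_eq, if_neg hev]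
      rw [hbs, hcast]
      exact ih (t + 1) _ dq' head hxs' (by omega) (by omega)
        (by rw [hact2]; exact hIA2)
        (step_best stones k hk t best hd rest hIA2 hB)

lemma alt_spec (stones : List Int) (k : Int) (hk : 1 ≤ k) :
    1 ≤ solution_alt stones k ∧ solution_alt stones k ≤ 200000001 ∧
    (∀ m, 1 ≤ m → m < solution_alt stones k → ¬ Qp stones k m) ∧
    (solution_alt stones k ≤ 200000000 → Qp stones k (solution_alt stones k)) := by
  have hIA0 : InvAct stones k 0 (([] : List (Int × Int)).drop 0) := by
    refine ⟨by simp, by simp, ?_⟩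
    intro l _ h2; omega
  have hB0 : InvBest stones k 0 200000001 := by
    refine ⟨?_, Or.inl rfl, le_refl _⟩
    intro i hik; push_cast at hik; omega
  have hmain := fold_inv stones k hk stones 0 200000001 [] 0 rfl (Nat.zero_le _)
    (Nat.le_refl _) hIA0 hB0
  rw [show ((0 : Nat) : Int) = 0 from rfl] at hmain
  obtain ⟨hA, hW, hcap⟩ := hmain
  set b := ((PySem.List.enumerate stones).foldl (bStep k) (200000001, ([], 0))).1 with hb
  have hsa : solution_alt stones k = max 1 b := rfl
  rw [hsa]
  refine ⟨le_max_left _ _, max_le (by omega) hcap, ?_, ?_⟩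
  · intro m h1 h2 hq
    obtain ⟨i, hik, hall⟩ := hq
    obtain ⟨l, l1, l2, l3⟩ := hA i hik
    have := hall l l1 l2
    omega
  · intro hle
    have hble : b ≤ 200000000 := le_trans (le_max_right 1 b) hle
    rcases hW with h | ⟨i, hik, hall⟩
    · omega
    · exact ⟨i, hik, fun l hl1 hl2 => le_trans (hall l hl1 hl2) (le_max_right 1 b)⟩

-- ===== VERDICT (by name: the statement is the Claim_ definition above) =====
theorem solution_spec : Claim_equal_solution := by
  intro stones k _hdom hk
  have hk' : (1 : Int) ≤ k := hk
  obtain ⟨hb1, hb2, hb3, hb4⟩ := alt_spec stones k hk'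
  obtain ⟨ha1, ha2, ha3, ha4⟩ := aLoop_spec stones k hk' 1 200000000 (by omega)
  show solution stones k = solution_alt stones k
  unfold solution
  set a := aLoop stones k 1 200000000 with ha
  set b := solution_alt stones k with hbb
  rcases lt_trichotomy a b with h | h | h
  · exact absurd (ha4 (by omega)) (hb3 a ha1 h)
  · exact h
  · exact absurd (hb4 (by omega)) (ha3 b hb1 h)
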